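-- pv_equiv track=rewrite | github.com/jbkim0526/Problem_Solving | 프로그래머스/Level3/70. 산모양 타일링/sol.py | solution
-- ===== SOURCE A (Python) =====
-- def solution(n, tops):
--     answer = 0
--
--     N = 2*n+1
--     blocks = [0 for _ in range(N)]
--
--     for i,top in enumerate(tops):
--         blocks[2*i+1] = top
--
--     dp = [[0 for _ in range(3)] for _ in range(N)]
--
--     dp[0][:] = [1,0,0]
--     dp[1][:] = [1,1,1] if blocks[1] else [1,1,0]
--
--     for i in range(2,N):
--         if blocks[i]:
--              dp[i][0] = sum(dp[i-1][:]) % 10007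
--              dp[i][1] = sum(dp[i-2][:]) % 10007
--              dp[i][2] = sum(dp[i-1][:]) % 10007
--         else:
--             dp[i][0] = sum(dp[i-1][:]) % 10007
--             dp[i][1] = sum(dp[i-2][:]) % 10007
--             dp[i][2] = 0
--
--     return sum(dp[N-1][:]) % 10007
-- ===== SOURCE B (Python) =====
-- def solution(n, tops):
--     # Transfer-matrix formulation: each pair of columns (odd position 2j+1, even
--     # position 2j+2) contributes a 2x2 matrix; the answer is the first component
--     # of the divide-and-conquer product of these matrices applied to (1, 1),
--     # all arithmetic mod 10007.
--     M = 10007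
--
--     def mul(X, Y):
--         a, b, c, d = X
--         e, f, g, h = Y
--         return ((a * e + b * g) % M, (a * f + b * h) % M,
--                 (c * e + d * g) % M, (c * f + d * h) % M)
--
--     mats = [(3, 1, 2, 1) if j < len(tops) and tops[j] else (2, 1, 1, 1)
--             for j in range(n)]
--
--     def prod(lo, hi):
--         # product mats[hi-1] @ ... @ mats[lo], hi - lo >= 1
--         if hi - lo == 1:
--             return mats[lo]
--         mid = (lo + hi) // 2
--         return mul(prod(mid, hi), prod(lo, mid))
--
--     a, b, c, d = prod(0, n)
--     return (a + b) % M
-- ===== Notes on version B (the rewrite author's own statement) =====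
-- stated objective: alternative
-- what changed: Replaces the N x 3 dp table scan with a transfer-matrix formulation: each pair of columns becomes a 2x2 matrix built directly from tops (no blocks array), the matrices are combined by a recursive divide-and-conquer modular matrix product, and the answer is read off the product applied to (1,1).
import Mathlib
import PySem

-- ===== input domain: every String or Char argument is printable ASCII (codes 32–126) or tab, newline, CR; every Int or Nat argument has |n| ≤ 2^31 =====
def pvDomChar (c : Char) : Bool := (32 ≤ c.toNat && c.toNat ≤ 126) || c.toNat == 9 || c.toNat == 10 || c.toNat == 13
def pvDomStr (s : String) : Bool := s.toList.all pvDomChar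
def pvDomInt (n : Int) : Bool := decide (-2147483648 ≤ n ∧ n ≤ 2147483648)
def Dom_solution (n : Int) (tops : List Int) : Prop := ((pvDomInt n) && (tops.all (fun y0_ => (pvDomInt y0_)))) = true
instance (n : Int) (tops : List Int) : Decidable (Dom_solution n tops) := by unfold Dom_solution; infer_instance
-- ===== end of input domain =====

-- B replaces A's N×3 dp-table scan by a transfer-matrix formulation: one 2×2 matrix per pair of
-- columns, built directly from tops, combined by a recursive divide-and-conquer modular matrix
-- product (objective: alternative).

-- ===== PORT A =====
-- Python-list read/write at a nonnegative in-range index (the only indices these programs use;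
-- Pre_ keeps every index in range, exactly where Python does not raise). Array = Python list.
def pyArrGet {α : Type} (a : Array α) (i : Int) (d : α) : α := a.getD i.toNat d
def pyArrSet {α : Type} (a : Array α) (i : Int) (v : α) : Array α := a.setIfInBounds i.toNat v

-- loop body of 'for i in range(2, N)'; the '[:]' row copies are no-ops on the summed row
def stepA (blocks : Array Int) (dp : Array (List Int)) (i : Int) : Array (List Int) :=
  if pyArrGet blocks i 0 ≠ 0 then
    pyArrSet dp i
      [PySem.Int.mod (pyArrGet dp (i-1) []).sum 10007,
       PySem.Int.mod (pyArrGet dp (i-2) []).sum 10007,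
       PySem.Int.mod (pyArrGet dp (i-1) []).sum 10007]
  else
    pyArrSet dp i
      [PySem.Int.mod (pyArrGet dp (i-1) []).sum 10007,
       PySem.Int.mod (pyArrGet dp (i-2) []).sum 10007,
       0]

def solution (n : Int) (tops : List Int) : Int :=
  let N : Int := 2*n+1
  let blocks : Array Int :=
    (PySem.List.enumerate tops).foldl
      (fun b p => pyArrSet b (2*p.1+1) p.2) (Array.replicate N.toNat 0)
  let dp0 : Array (List Int) := Array.replicate N.toNat [0,0,0]
  let dp1 := pyArrSet dp0 0 [1,0,0]
  let dp2 := pyArrSet dp1 1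
      (if pyArrGet blocks 1 0 ≠ 0 then [1,1,1] else [1,1,0])
  let dp := (PySem.List.pyRange 2 N 1).foldl (stepA blocks) dp2
  PySem.Int.mod (pyArrGet dp (N-1) []).sum 10007

-- ===== PORT B =====
-- 2×2 matrix (a,b,c,d) = [[a,b],[c,d]] with entries mod 10007; B's 'mul'
def mulM (X Y : Int × Int × Int × Int) : Int × Int × Int × Int :=
  (PySem.Int.mod (X.1 * Y.1 + X.2.1 * Y.2.2.1) 10007,
   PySem.Int.mod (X.1 * Y.2.1 + X.2.1 * Y.2.2.2) 10007,
   PySem.Int.mod (X.2.2.1 * Y.1 + X.2.2.2 * Y.2.2.1) 10007,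
   PySem.Int.mod (X.2.2.1 * Y.2.1 + X.2.2.2 * Y.2.2.2) 10007)

-- B's recursive 'prod(lo, hi)': product mats[hi-1] · … · mats[lo]; the base case 'hi - lo == 1'
-- is written 'hi - lo ≤ 1' only to make the recursion total (B never calls it with hi ≤ lo + 1
-- except hi = lo + 1)
def prodM (mats : List (Int × Int × Int × Int)) (lo hi : Int) :
    Int × Int × Int × Int :=
  if hi - lo ≤ 1 then PySem.List.pyGetD mats lo (0,0,0,0)
  else
    mulM (prodM mats (PySem.Int.floordiv (lo + hi) 2) hi)
         (prodM mats lo (PySem.Int.floordiv (lo + hi) 2))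
termination_by (hi - lo).toNat
decreasing_by
  · have h1 : lo + 1 ≤ PySem.Int.floordiv (lo + hi) 2 :=
      (PySem.Int.le_floordiv_iff_mul_le (by norm_num)).mpr (by omega)
    omega
  · have h2 : PySem.Int.floordiv (lo + hi) 2 < hi :=
      (PySem.Int.floordiv_lt_iff_lt_mul (by norm_num)).mpr (by omega)
    have h1 : lo + 1 ≤ PySem.Int.floordiv (lo + hi) 2 :=
      (PySem.Int.le_floordiv_iff_mul_le (by norm_num)).mpr (by omega)
    omega

def solution_alt (n : Int) (tops : List Int) : Int :=
  let mats :=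
    (PySem.List.pyRange 0 n 1).map (fun j =>
      if j < (tops.length : Int) ∧ PySem.List.pyGetD tops j 0 ≠ 0
      then ((3:Int), (1:Int), (2:Int), (1:Int)) else (2, 1, 1, 1))
  let P := prodM mats 0 n
  PySem.Int.mod (P.1 + P.2.1) 10007

-- ===== PRECONDITION & SPEC =====
-- Pre_ excludes exactly the inputs where Python A raises IndexError: n < 1 (dp[1] or blocks[1]
-- does not exist) or len(tops) > n (the write blocks[2*i+1] runs off the end).
def Pre_solution (n : Int) (tops : List Int) : Prop := 1 ≤ n ∧ (tops.length : Int) ≤ n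
instance (n : Int) (tops : List Int) : Decidable (Pre_solution n tops) := by unfold Pre_solution; infer_instance
def pvWitness_solution : Int × List Int := (2, [1, 0])
def Spec_solution (n : Int) (tops : List Int) (out : Int) : Prop := out = solution_alt n tops
instance (n : Int) (tops : List Int) (out : Int) : Decidable (Spec_solution n tops out) := by unfold Spec_solution; infer_instance

-- ===== CLAIM (what is proved, stated in full; the proofs are below) =====
def Claim_equal_solution : Prop := ∀ (n : Int) (tops : List Int), Dom_solution n tops → Pre_solution n tops → Spec_solution n tops (solution n tops)

-- ===== LEMMAS AND PROOFS =====

-- proof-side scalar recurrence: one column step on the state (u_{i-2} mod, u_{i-1} mod)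
def stepB (dbl : Array Bool) (s : Int × Int) (i : Int) : Int × Int :=
  (s.2, PySem.Int.mod (s.2 * (if pyArrGet dbl i false then 2 else 1) + s.1) 10007)

-- proof-side: a matrix applied to a column vector (u_i, u_{i-1}), entries reduced mod 10007
def applyV (X : Int × Int × Int × Int) (v : Int × Int) : Int × Int :=
  (PySem.Int.mod (X.1 * v.1 + X.2.1 * v.2) 10007,
   PySem.Int.mod (X.2.2.1 * v.1 + X.2.2.2 * v.2) 10007)

lemma aget_aset_eq {α : Type} (a : Array α) (i : Int) (v d : α) (h : i.toNat < a.size) :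
    pyArrGet (pyArrSet a i v) i d = v := by
  simp [pyArrGet, pyArrSet, Array.getD_eq_getD_getElem?, h]

lemma aget_aset_ne {α : Type} (a : Array α) (i j : Int) (v d : α) (hne : i.toNat ≠ j.toNat) :
    pyArrGet (pyArrSet a i v) j d = pyArrGet a j d := by
  simp [pyArrGet, pyArrSet, Array.getD_eq_getD_getElem?, hne]

-- the truthiness bridge: the bool array read = truthiness of A's blocks read
lemma aget_map_decide (a : Array Int) (j : Int) :
    pyArrGet (a.map (fun x => decide (x ≠ 0))) j false = decide (pyArrGet a j 0 ≠ 0) := by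
  simp only [pyArrGet, Array.getD_eq_getD_getElem?, Array.getElem?_map]
  cases a[j.toNat]? <;> simp

lemma fold_size_blocks : ∀ (l : List (Int × Int)) (b : Array Int),
    (l.foldl (fun b p => pyArrSet b (2*p.1+1) p.2) b).size = b.size := by
  intro l
  induction l with
  | nil => intro b; rfl
  | cons p l ih =>
    intro b
    rw [List.foldl_cons, ih (pyArrSet b (2*p.1+1) p.2)]
    simp [pyArrSet, Array.size_setIfInBounds]

-- mod-10007 congruence via ZMod: to identify two reduced values, compare their casts
lemma pmod_eq_pmod {a b : Int} (h : (a : ZMod 10007) = (b : ZMod 10007)) :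
    PySem.Int.mod a 10007 = PySem.Int.mod b 10007 := by
  rw [PySem.Int.mod_eq_emod_of_pos (by norm_num), PySem.Int.mod_eq_emod_of_pos (by norm_num)]
  exact_mod_cast (ZMod.intCast_eq_intCast_iff' a b 10007).mp h

lemma cast_pmod (a : Int) : ((PySem.Int.mod a 10007 : Int) : ZMod 10007) = (a : ZMod 10007) := by
  rw [PySem.Int.mod_eq_emod_of_pos (by norm_num)]
  exact_mod_cast ZMod.intCast_mod a 10007

-- applying a (mod-reduced) product = applying the factors one after the other
lemma applyV_mulM (X Y : Int × Int × Int × Int) (v : Int × Int) :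
    applyV (mulM X Y) v = applyV X (applyV Y v) := by
  obtain ⟨a, b, c, d⟩ := X; obtain ⟨e, f, g, h⟩ := Y; obtain ⟨x, y⟩ := v
  simp only [applyV, mulM, Prod.mk.injEq]
  constructor <;>
  · refine pmod_eq_pmod ?_
    push_cast [cast_pmod]
    ring

-- the D&C product applied to a vector = the left-to-right fold of the factors
lemma prodM_apply : ∀ (k : Nat) (mats : List (Int × Int × Int × Int)) (lo hi : Int),
    lo < hi → hi - lo = (k : Int) →
    ∀ v, applyV (prodM mats lo hi) v
      = (PySem.List.pyRange lo hi 1).foldl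
          (fun v j => applyV (PySem.List.pyGetD mats j (0,0,0,0)) v) v := by
  intro k
  induction k using Nat.strong_induction_on with
  | _ k ih =>
    intro mats lo hi hlt hk v
    rw [prodM]
    by_cases h1 : hi - lo ≤ 1
    · have : hi = lo + 1 := by omega
      subst this
      rw [if_pos h1, PySem.List.pyRange_one_singleton]
      simp
    · rw [if_neg h1]
      set mid := PySem.Int.floordiv (lo + hi) 2 with hmid
      have hm1 : lo + 1 ≤ mid :=
        (PySem.Int.le_floordiv_iff_mul_le (by norm_num)).mpr (by omega)
      have hm2 : mid < hi :=
        (PySem.Int.floordiv_lt_iff_lt_mul (by norm_num)).mpr (by omega)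
      rw [applyV_mulM,
          ih (mid - lo).toNat (by omega) mats lo mid (by omega) (by omega) v,
          ih (hi - mid).toNat (by omega) mats mid hi (by omega) (by omega) _,
          PySem.List.pyRange_one_append lo mid hi (by omega) (by omega),
          List.foldl_append]

-- characterisation of A's blocks array: even entries stay 0
lemma blocks_even : ∀ (tops : List Int) (s : Int) (b : Array Int) (q : Nat),
    0 ≤ s → q % 2 = 0 →
    pyArrGet ((PySem.List.enumerate tops s).foldl
        (fun b p => pyArrSet b (2*p.1+1) p.2) b) (q : Int) 0 = pyArrGet b (q : Int) 0 := by
  intro tops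
  induction tops with
  | nil => intro s b q _ _; simp [PySem.List.enumerate_nil]
  | cons t ts ih =>
    intro s b q hs hq
    rw [PySem.List.enumerate_cons, List.foldl_cons, ih (s+1) _ q (by omega) hq,
        aget_aset_ne]
    have : (2*s+1).toNat = 2*s.toNat + 1 := by omega
    omega

-- entries below the write window stay put
lemma blocks_lo : ∀ (tops : List Int) (s : Int) (b : Array Int) (q : Nat),
    0 ≤ s → (q : Int) < 2*s+1 →
    pyArrGet ((PySem.List.enumerate tops s).foldl
        (fun b p => pyArrSet b (2*p.1+1) p.2) b) (q : Int) 0 = pyArrGet b (q : Int) 0 := by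
  intro tops
  induction tops with
  | nil => intro s b q _ _; simp [PySem.List.enumerate_nil]
  | cons t ts ih =>
    intro s b q hs hq
    rw [PySem.List.enumerate_cons, List.foldl_cons, ih (s+1) _ q (by omega) (by omega),
        aget_aset_ne]
    omega

-- odd entry 2(s+j)+1 after the fold: the j-th element of the remaining tops
lemma blocks_odd : ∀ (tops : List Int) (s : Int) (b : Array Int) (j : Nat)
    (_ : 0 ≤ s) (_ : j < tops.length) (_ : (2*(s + j) + 1).toNat < b.size),
    pyArrGet ((PySem.List.enumerate tops s).foldl
        (fun b p => pyArrSet b (2*p.1+1) p.2) b) (2*(s + (j:Int)) + 1) 0 = tops[j] := by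
  intro tops
  induction tops with
  | nil => intro s b j _ hj; simp at hj
  | cons t ts ih =>
    intro s b j hs hj hsz
    rw [PySem.List.enumerate_cons, List.foldl_cons]
    cases j with
    | zero =>
      simp only [Nat.cast_zero]
      have h0 : (2*(s + (0:Int)) + 1) = 2*s+1 := by ring
      rw [h0]
      have := blocks_lo ts (s+1) (pyArrSet b (2*s+1) t) (2*s+1).toNat (by omega) (by omega)
      rw [show ((((2*s+1).toNat : Nat)) : Int) = 2*s+1 from by omega] at this
      rw [this, aget_aset_eq]
      · simp
      · simpa [pyArrSet, Array.size_setIfInBounds] using (by omega : (2*(s+(0:Int))+1).toNat < b.size)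
    | succ j' =>
      have harg : 2*(s + ((j'+1 : Nat) : Int)) + 1 = 2*((s+1) + (j' : Int)) + 1 := by push_cast; ring
      rw [harg, ih (s+1) _ j' (by omega) (by simpa using hj)]
      · simp
      · simp only [pyArrSet, Array.size_setIfInBounds]
        have : (2*((s+1) + (j':Int))+1).toNat = (2*(s + ((j'+1:Nat):Int))+1).toNat := by push_cast; omega
        omega

-- main loop invariant (A side): A's fold over the dp table tracked by the scalar fold stepB
lemma loop_inv (blocks : Array Int) (N : Int)
    (hlb : (blocks.size : Int) = N) :
    ∀ (k : Nat) (i : Int), 2 ≤ i → i + k = N →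
    ∀ (dp : Array (List Int)) (p2 p1 : Int),
    (dp.size : Int) = N →
    PySem.Int.mod (pyArrGet dp (i-1) []).sum 10007 = p1 →
    PySem.Int.mod (pyArrGet dp (i-2) []).sum 10007 = p2 →
    PySem.Int.mod (pyArrGet ((PySem.List.pyRange i N 1).foldl (stepA blocks) dp) (N-1) []).sum 10007
      = ((PySem.List.pyRange i N 1).foldl (stepB (blocks.map (fun x => decide (x ≠ 0)))) (p2, p1)).2 := by
  intro k
  induction k with
  | zero =>
    intro i h2 hik dp p2 p1 hlen h1 hsub
    have : i = N := by omega
    subst this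
    rw [PySem.List.pyRange_one_eq_nil (by omega)]
    simpa using h1
  | succ k ih =>
    intro i h2 hik dp p2 p1 hlen h1 hsub
    have hiN : i < N := by omega
    rw [PySem.List.pyRange_one_cons hiN]
    simp only [List.foldl_cons]
    have hbr : pyArrGet (blocks.map (fun x => decide (x ≠ 0))) i false
        = decide (pyArrGet blocks i 0 ≠ 0) := aget_map_decide blocks i
    have hget_i : ∀ (row : List Int), pyArrGet (pyArrSet dp i row) i [] = row := by
      intro row; exact aget_aset_eq dp i row [] (by omega)
    have hget_im1 : ∀ (row : List Int),
        pyArrGet (pyArrSet dp i row) (i-1) [] = pyArrGet dp (i-1) [] := by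
      intro row; exact aget_aset_ne dp i (i-1) row [] (by omega)
    have hsize : ∀ (row : List Int), ((pyArrSet dp i row).size : Int) = N := by
      intro row; simp [pyArrSet, Array.size_setIfInBounds]; omega
    by_cases hc : pyArrGet blocks i 0 ≠ 0
    · rw [show stepA blocks dp i = pyArrSet dp i
            [PySem.Int.mod (pyArrGet dp (i-1) []).sum 10007,
             PySem.Int.mod (pyArrGet dp (i-2) []).sum 10007,
             PySem.Int.mod (pyArrGet dp (i-1) []).sum 10007] from by
            simp [stepA, hc]]
      rw [show stepB (blocks.map (fun x => decide (x ≠ 0))) (p2, p1) i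
            = (p1, PySem.Int.mod (p1 * 2 + p2) 10007) from by
            simp only [stepB]; rw [hbr]; simp [hc]]
      rw [h1, hsub]
      refine ih (i+1) (by omega) (by omega) _ p1 (PySem.Int.mod (p1 * 2 + p2) 10007)
        (hsize _) ?_ ?_
      · rw [show i+1-1 = i from by omega, hget_i]
        simp only [List.sum_cons, List.sum_nil]
        congr 1; ring
      · rw [show i+1-2 = i-1 from by omega, hget_im1, h1]
    · rw [show stepA blocks dp i = pyArrSet dp i
            [PySem.Int.mod (pyArrGet dp (i-1) []).sum 10007,
             PySem.Int.mod (pyArrGet dp (i-2) []).sum 10007,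
             0] from by simp [stepA, hc]]
      rw [show stepB (blocks.map (fun x => decide (x ≠ 0))) (p2, p1) i
            = (p1, PySem.Int.mod (p1 * 1 + p2) 10007) from by
            simp only [stepB]; rw [hbr]; simp [hc]]
      rw [h1, hsub]
      refine ih (i+1) (by omega) (by omega) _ p1 (PySem.Int.mod (p1 * 1 + p2) 10007)
        (hsize _) ?_ ?_
      · rw [show i+1-1 = i from by omega, hget_i]
        simp only [List.sum_cons, List.sum_nil]
        congr 1; ring
      · rw [show i+1-2 = i-1 from by omega, hget_im1, h1]

-- two scalar column steps (odd column 2j+1, even column 2j+2) = one pair matrix applied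
lemma pair_step (dbl : Array Bool) (c : Bool) (j : Int)
    (hodd : pyArrGet dbl (2*j+1) false = c)
    (heven : pyArrGet dbl (2*j+2) false = false)
    (v : Int × Int) :
    stepB dbl (stepB dbl (v.2, v.1) (2*j+1)) (2*j+2)
      = (((applyV (if c then ((3:Int),(1:Int),(2:Int),(1:Int)) else (2,1,1,1)) v).2),
         ((applyV (if c then ((3:Int),(1:Int),(2:Int),(1:Int)) else (2,1,1,1)) v).1)) := by
  obtain ⟨x, y⟩ := v
  simp only [stepB, hodd, heven, applyV, Bool.false_eq_true, if_false]
  cases c <;>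
  · simp only [if_true, if_false, Bool.false_eq_true]
    refine Prod.ext ?_ ?_ <;>
      exact pmod_eq_pmod (by push_cast [cast_pmod]; ring)

-- entries above the write window stay put
lemma blocks_hi : ∀ (tops : List Int) (s : Int) (b : Array Int) (q : Int),
    0 ≤ s → 2*(s + tops.length) + 1 ≤ q →
    pyArrGet ((PySem.List.enumerate tops s).foldl
        (fun b p => pyArrSet b (2*p.1+1) p.2) b) q 0 = pyArrGet b q 0 := by
  intro tops
  induction tops with
  | nil => intro s b q _ _; simp [PySem.List.enumerate_nil]
  | cons t ts ih =>
    intro s b q hs hq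
    simp only [List.length_cons] at hq
    rw [PySem.List.enumerate_cons, List.foldl_cons,
        ih (s+1) _ q (by omega) (by push_cast at hq ⊢; omega),
        aget_aset_ne]
    push_cast at hq
    omega

-- the whole scalar fold over columns 1..2n = the fold of the pair matrices over 0..n-1
lemma pairing (dbl : Array Bool) (mats : List (Int × Int × Int × Int)) (n : Int)
    (hmat : ∀ j : Int, 0 ≤ j → j < n → PySem.List.pyGetD mats j (0,0,0,0)
        = (if pyArrGet dbl (2*j+1) false then ((3:Int),(1:Int),(2:Int),(1:Int)) else (2,1,1,1)))
    (heven : ∀ j : Int, 0 ≤ j → j < n → pyArrGet dbl (2*j+2) false = false) :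
    ∀ (k : Nat) (j : Int), 0 ≤ j → j + k = n → ∀ v : Int × Int,
    ((PySem.List.pyRange (2*j+1) (2*n+1) 1).foldl (stepB dbl) (v.2, v.1)).2
      = ((PySem.List.pyRange j n 1).foldl
          (fun v i => applyV (PySem.List.pyGetD mats i (0,0,0,0)) v) v).1 := by
  intro k
  induction k with
  | zero =>
    intro j hj hjk v
    have : j = n := by omega
    subst this
    rw [PySem.List.pyRange_one_eq_nil (by omega), PySem.List.pyRange_one_eq_nil (by omega)]
    simp
  | succ k ih =>
    intro j hj hjk v
    have hjn : j < n := by omega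
    have e1 : PySem.List.pyRange (2*j+1) (2*n+1) 1
        = (2*j+1) :: (2*j+2) :: PySem.List.pyRange (2*(j+1)+1) (2*n+1) 1 := by
      rw [PySem.List.pyRange_one_cons (by omega),
          show 2*j+1+1 = 2*j+2 from by ring,
          PySem.List.pyRange_one_cons (by omega),
          show 2*j+2+1 = 2*(j+1)+1 from by ring]
    rw [e1, PySem.List.pyRange_one_cons hjn]
    simp only [List.foldl_cons]
    rw [pair_step dbl (pyArrGet dbl (2*j+1) false) j rfl (heven j hj hjn) v,
        ih (j+1) (by omega) (by omega)
          (applyV (if pyArrGet dbl (2*j+1) false then ((3:Int),(1:Int),(2:Int),(1:Int)) else (2,1,1,1)) v),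
        hmat j hj hjn]

-- ===== VERDICT (by name: the statement is the Claim_ definition above) =====
theorem solution_spec : Claim_equal_solution := by
  intro n tops _ hpre
  obtain ⟨hn, hlt⟩ := hpre
  unfold Spec_solution solution solution_alt
  simp only []
  set N : Int := 2*n+1 with hN
  have hN3 : 3 ≤ N := by omega
  set blocks : Array Int :=
    (PySem.List.enumerate tops).foldl
      (fun b p => pyArrSet b (2*p.1+1) p.2) (Array.replicate N.toNat 0) with hblocks
  have hlb : (blocks.size : Int) = N := by
    rw [hblocks, fold_size_blocks]; simp; omega
  have hrepl : ∀ q : Int, pyArrGet (Array.replicate N.toNat (0:Int)) q 0 = 0 := by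
    intro q
    simp only [pyArrGet, Array.getD_eq_getD_getElem?, Array.getElem?_replicate]
    split <;> simp
  -- A side: reduce to the scalar fold over columns 2..2n
  set row1 : List Int := if pyArrGet blocks 1 0 ≠ 0 then [1,1,1] else [1,1,0] with hrow1
  set dp1 : Array (List Int) := pyArrSet (Array.replicate N.toNat ([0,0,0] : List Int)) 0 [1,0,0] with hdp1
  have hsize1 : dp1.size = N.toNat := by simp [hdp1, pyArrSet, Array.size_setIfInBounds]
  have hg1 : pyArrGet (pyArrSet dp1 1 row1) (2-1) [] = row1 := by
    have := aget_aset_eq dp1 1 row1 [] (by rw [hsize1]; omega)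
    simpa using this
  have hg0 : pyArrGet (pyArrSet dp1 1 row1) (2-2) [] = [1,0,0] := by
    have h := aget_aset_ne dp1 1 0 row1 [] (by omega)
    have h2 := aget_aset_eq (Array.replicate N.toNat ([0,0,0] : List Int)) 0 ([1,0,0] : List Int) [] (by simp; omega)
    simp only [show (2:Int)-2 = 0 from by norm_num]
    rw [h, hdp1, h2]
  have hbr1 : pyArrGet (blocks.map (fun x => decide (x ≠ 0))) 1 false
      = decide (pyArrGet blocks 1 0 ≠ 0) := aget_map_decide blocks 1
  have hA := loop_inv blocks N hlb (N-2).toNat 2 (by omega) (by omega)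
    (pyArrSet dp1 1 row1) 1 (if pyArrGet blocks 1 0 ≠ 0 then 3 else 2)
    (by simp [pyArrSet, Array.size_setIfInBounds, hsize1]; omega)
    (by rw [hg1, hrow1]; by_cases hc : pyArrGet blocks 1 0 ≠ 0 <;> simp [hc])
    (by rw [hg0]; decide)
  rw [hA]
  -- absorb the first column step: fold from 1 starting at (1,1)
  have hstep1 : stepB (blocks.map (fun x => decide (x ≠ 0))) (1, 1) 1
      = ((1 : Int), if pyArrGet blocks 1 0 ≠ 0 then (3 : Int) else 2) := by
    simp only [stepB, hbr1]
    by_cases hc : pyArrGet blocks 1 0 ≠ 0 <;> simp [hc]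
  have hA1 : ((PySem.List.pyRange 1 N 1).foldl (stepB (blocks.map (fun x => decide (x ≠ 0)))) ((1:Int), (1:Int))).2
      = ((PySem.List.pyRange 2 N 1).foldl (stepB (blocks.map (fun x => decide (x ≠ 0))))
          (1, if pyArrGet blocks 1 0 ≠ 0 then 3 else 2)).2 := by
    rw [PySem.List.pyRange_one_cons (by omega : (1:Int) < N), List.foldl_cons, hstep1,
        show (1:Int)+1 = 2 from by norm_num]
  rw [← hA1]
  -- facts about the pair matrices built from tops
  have hmat : ∀ j : Int, 0 ≤ j → j < n →
      PySem.List.pyGetD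
        ((PySem.List.pyRange 0 n 1).map (fun j =>
          if j < (tops.length : Int) ∧ PySem.List.pyGetD tops j 0 ≠ 0
          then ((3:Int), (1:Int), (2:Int), (1:Int)) else (2, 1, 1, 1))) j (0,0,0,0)
      = (if pyArrGet (blocks.map (fun x => decide (x ≠ 0))) (2*j+1) false
         then ((3:Int),(1:Int),(2:Int),(1:Int)) else (2,1,1,1)) := by
    intro j hj hjn
    rw [PySem.List.pyGetD_map_pyRange_of_nonneg _ n j _ hj hjn, aget_map_decide]
    by_cases hjl : j < (tops.length : Int)
    · have hb := blocks_odd tops 0 (Array.replicate N.toNat 0) j.toNat (le_refl 0)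
        (by omega) (by simp; omega)
      rw [show 2*((0:Int) + (j.toNat : Int)) + 1 = 2*j+1 from by omega] at hb
      rw [← hblocks] at hb
      rw [hb, PySem.List.pyGetD_of_nonneg tops _ hj,
          List.getD_eq_getElem tops 0 (by omega)]
      by_cases hz : tops[j.toNat] = 0 <;> simp [hz, hjl]
    · have hb := blocks_hi tops 0 (Array.replicate N.toNat 0) (2*j+1) (le_refl 0) (by omega)
      rw [← hblocks] at hb
      rw [hb, hrepl]
      simp [hjl]
  have heven : ∀ j : Int, 0 ≤ j → j < n →
      pyArrGet (blocks.map (fun x => decide (x ≠ 0))) (2*j+2) false = false := by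
    intro j hj hjn
    rw [aget_map_decide]
    have hb := blocks_even tops 0 (Array.replicate N.toNat 0) (2*j+2).toNat (le_refl 0) (by omega)
    rw [show (((2*j+2).toNat : Nat) : Int) = 2*j+2 from by omega] at hb
    rw [← hblocks] at hb
    rw [hb, hrepl]
    simp
  have hpair := pairing (blocks.map (fun x => decide (x ≠ 0))) _ n hmat heven n.toNat 0
    (le_refl 0) (by omega) ((1:Int), (1:Int))
  rw [show 2*(0:Int)+1 = 1 from by norm_num, ← hN] at hpair
  rw [hpair]
  -- B side: the D&C product applied to (1,1) is that same fold
  rw [← prodM_apply n.toNat _ 0 n (by omega) (by omega) ((1:Int), (1:Int))]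
  simp only [applyV]
  exact (pmod_eq_pmod (by push_cast; ring)).symm
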